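-- pv_equiv track=rewrite | github.com/sunsikham/my_fv_project | scripts/score_cross_relation_context_drift_logit.py | _build_pattern_label
-- ===== SOURCE A (Python) =====
-- from typing import Dict, List, Sequence, Tuple
--
-- def _build_pattern_label(start_src: str, other_src: str, shot: int) -> str:
--     seq: List[str] = []
--     for pos in range(shot):
--         if pos % 2 == 0:
--             seq.append(start_src)
--         else:
--             seq.append(other_src)
--     return "".join(seq)
-- ===== SOURCE B (Python) =====
-- def _build_pattern_label(start_src: str, other_src: str, shot: int) -> str:
--     m = shot if shot > 0 else 0
--     return (start_src + other_src) * (m // 2) + start_src * (m % 2)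
-- ===== Notes on version B (the rewrite author's own statement) =====
-- stated objective: simpler
-- what changed: Replaces the per-position loop with parity branches by a closed-form string multiplication: (start+other) repeated shot//2 times plus start if shot is odd (shot clamped to 0).
import Mathlib
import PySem

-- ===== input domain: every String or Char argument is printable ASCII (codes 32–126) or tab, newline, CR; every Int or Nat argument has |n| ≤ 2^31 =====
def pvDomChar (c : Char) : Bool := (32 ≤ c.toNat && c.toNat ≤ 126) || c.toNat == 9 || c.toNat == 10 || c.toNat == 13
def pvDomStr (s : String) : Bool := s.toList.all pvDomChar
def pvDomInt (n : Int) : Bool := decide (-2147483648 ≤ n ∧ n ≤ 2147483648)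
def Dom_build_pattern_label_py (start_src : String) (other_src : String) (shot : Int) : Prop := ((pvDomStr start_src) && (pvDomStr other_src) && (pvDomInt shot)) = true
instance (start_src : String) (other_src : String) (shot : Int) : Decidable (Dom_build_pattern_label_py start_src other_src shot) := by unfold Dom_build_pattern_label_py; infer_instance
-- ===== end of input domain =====

-- B builds the result by closed-form string multiplication instead of A's per-position loop (objective: simpler).

-- ===== PORT A =====
-- literal port: seq = []; for pos in range(shot): append start/other by parity; "".join(seq)
def build_pattern_label_py (start_src : String) (other_src : String) (shot : Int) : String :=
  let seq : List String :=
    (PySem.List.pyRange 0 shot 1).foldl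
      (fun acc pos => acc ++ [if PySem.Int.mod pos 2 == 0 then start_src else other_src]) []
  PySem.Str.join "" seq

-- ===== PORT B =====
-- Python's  str * int  (empty for non-positive counts), exact on char lists
def pyStrMulChars (cs : List Char) : Nat → List Char
  | 0 => []
  | n + 1 => cs ++ pyStrMulChars cs n

def build_pattern_label_py_alt (start_src : String) (other_src : String) (shot : Int) : String :=
  let m : Int := if shot > 0 then shot else 0
  String.ofList
    (pyStrMulChars (start_src.toList ++ other_src.toList) (PySem.Int.floordiv m 2).toNat ++
     pyStrMulChars start_src.toList (PySem.Int.mod m 2).toNat)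

-- ===== PRECONDITION & SPEC =====
def Spec_build_pattern_label_py (start_src : String) (other_src : String) (shot : Int) (out : String) : Prop := out = build_pattern_label_py_alt start_src other_src shot
instance (start_src : String) (other_src : String) (shot : Int) (out : String) : Decidable (Spec_build_pattern_label_py start_src other_src shot out) := by unfold Spec_build_pattern_label_py; infer_instance

-- ===== CLAIM (what is proved, stated in full; the proofs are below) =====
def Claim_equal_build_pattern_label_py : Prop := ∀ (start_src : String) (other_src : String) (shot : Int), Dom_build_pattern_label_py start_src other_src shot → Spec_build_pattern_label_py start_src other_src shot (build_pattern_label_py start_src other_src shot)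

-- ===== LEMMAS AND PROOFS =====

theorem pyStrMulChars_comm (cs : List Char) (n : Nat) :
    cs ++ pyStrMulChars cs n = pyStrMulChars cs n ++ cs := by
  induction n with
  | zero => simp [pyStrMulChars]
  | succ k ih =>
      rw [show pyStrMulChars cs (k + 1) = cs ++ pyStrMulChars cs k from rfl]
      rw [List.append_assoc, ih]

theorem pyStrMulChars_succ_right (cs : List Char) (n : Nat) :
    pyStrMulChars cs (n + 1) = pyStrMulChars cs n ++ cs := by
  rw [show pyStrMulChars cs (n + 1) = cs ++ pyStrMulChars cs n from rfl, pyStrMulChars_comm]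

-- "".join on char lists is flatten
theorem join_nil_flatten (l : List (List Char)) : PySem.Chars.join [] l = l.flatten := by
  induction l with
  | nil => simp [PySem.Chars.join, List.intercalate]
  | cons h t ih =>
      cases t with
      | nil => simp [PySem.Chars.join, List.intercalate]
      | cons h2 t2 =>
          simp [PySem.Chars.join, List.intercalate, List.intersperse] at ih ⊢
          simpa using ih

-- the characters of A's loop output, as a function of the Nat trip count
theorem loop_chars (s o : String) (n : Nat) :
    (List.map String.toList
        ((PySem.List.pyRange 0 (n : Int) 1).foldl
          (fun acc pos => acc ++ [if PySem.Int.mod pos 2 == 0 then s else o]) [])).flatten =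
    pyStrMulChars (s.toList ++ o.toList) (n / 2) ++ pyStrMulChars s.toList (n % 2) := by
  induction n with
  | zero => simp [pyStrMulChars]
  | succ k ih =>
      have hr : PySem.List.pyRange 0 ((k : Int) + 1) 1
          = PySem.List.pyRange 0 (k : Int) 1 ++ [(k : Int)] :=
        PySem.List.pyRange_one_succ_right (by exact_mod_cast Nat.zero_le k)
      push_cast
      rw [hr, List.foldl_append, List.foldl_cons, List.foldl_nil, List.map_append,
          List.flatten_append, ih]
      rcases Nat.even_or_odd k with ⟨m, hm⟩ | ⟨m, hm⟩
      · have hmod : PySem.Int.mod (k : Int) 2 = 0 := by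
          simp [PySem.Int.mod, Int.fmod_eq_emod]; omega
        have h1 : k / 2 = m := by omega
        have h2 : k % 2 = 0 := by omega
        have h3 : (k + 1) / 2 = m := by omega
        have h4 : (k + 1) % 2 = 1 := by omega
        have hdvd : (2:Int) ∣ (k:Int) := by omega
        simp [hdvd, h1, h2, h3, h4, pyStrMulChars]
      · have hmod : PySem.Int.mod (k : Int) 2 = 1 := by
          simp [PySem.Int.mod, Int.fmod_eq_emod]; omega
        have h1 : k / 2 = m := by omega
        have h2 : k % 2 = 1 := by omega
        have h3 : (k + 1) / 2 = m + 1 := by omega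
        have h4 : (k + 1) % 2 = 0 := by omega
        have hdvd : ¬ (2:Int) ∣ (k:Int) := by omega
        simp [hdvd, h1, h2, h3, h4, pyStrMulChars, pyStrMulChars_succ_right]

-- ===== VERDICT (by name: the statement is the Claim_ definition above) =====
theorem build_pattern_label_py_spec : Claim_equal_build_pattern_label_py := by
  intro s o shot _
  unfold Spec_build_pattern_label_py build_pattern_label_py build_pattern_label_py_alt
  unfold PySem.Str.join
  by_cases h : shot > 0
  · have hn : shot = ((shot.toNat : Int)) := by omega
    simp only [h, if_pos, String.toList_empty]
    rw [hn, join_nil_flatten, loop_chars s o shot.toNat]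
    have hd : (PySem.Int.floordiv ((shot.toNat : Int)) 2).toNat = shot.toNat / 2 := by
      simp [PySem.Int.floordiv, Int.fdiv_eq_ediv]; omega
    have hm : (PySem.Int.mod ((shot.toNat : Int)) 2).toNat = shot.toNat % 2 := by
      simp [PySem.Int.mod, Int.fmod_eq_emod]; omega
    rw [hd, hm]
  · have hr : PySem.List.pyRange 0 shot 1 = [] :=
      PySem.List.pyRange_one_eq_nil (by omega)
    simp [h, hr, PySem.Int.floordiv, PySem.Int.mod, pyStrMulChars]
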